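-- pv_equiv track=rewrite | github.com/sb2bg/walrus | benchmarks/09_list_operations.py | list_benchmark
-- ===== SOURCE A (Python) =====
-- def list_benchmark(n):
--     # Build a list
--     arr = []
--     for i in range(n):
--         arr.append(i)
--
--     # Sum all elements
--     total = 0
--     for x in arr:
--         total += x
--
--     # Access elements randomly-ish
--     access_sum = 0
--     for i in range(n):
--         idx = (i * 7 + 13) % n
--         access_sum += arr[idx]
--
--     return total + access_sum
-- ===== SOURCE B (Python) =====
-- def list_benchmark(n):
--     # Closed form: sum(range(n)) appears twice when gcd(7, n) == 1 (the access
--     # indices are a permutation of range(n)); when 7 | n each index value in the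
--     # 7-step wrapped progression repeats 7 times.
--     if n <= 0:
--         return 0
--     total = n * (n - 1) // 2
--     if n % 7 == 0:
--         m = n // 7
--         access = 49 * (m * (m - 1) // 2) + 42 * m
--     else:
--         access = total
--     return total + access
-- ===== Notes on version B (the rewrite author's own statement) =====
-- stated objective: faster
-- what changed: Replaces the three O(n) loops (build list, sum elements, sum modular accesses) by a constant-time closed form: Gauss's formula for the element sum, and for the access sum the fact that the stride-7 index sequence is a permutation of the range when the stride is coprime to n, and otherwise a wrapped progression repeated stride-many times.
import Mathlib
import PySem

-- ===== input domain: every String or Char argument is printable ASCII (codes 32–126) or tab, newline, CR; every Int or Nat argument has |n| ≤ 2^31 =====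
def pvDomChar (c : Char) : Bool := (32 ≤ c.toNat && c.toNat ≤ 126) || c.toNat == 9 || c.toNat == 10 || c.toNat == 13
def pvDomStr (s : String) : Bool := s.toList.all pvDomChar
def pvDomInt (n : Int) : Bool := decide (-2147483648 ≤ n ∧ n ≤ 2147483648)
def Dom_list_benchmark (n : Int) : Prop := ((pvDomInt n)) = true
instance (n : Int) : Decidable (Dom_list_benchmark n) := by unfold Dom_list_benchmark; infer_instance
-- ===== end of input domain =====

-- B replaces A's three O(n) loops by a closed form: the access indices are a permutation
-- of the range when the stride is coprime to n, else a wrapped progression repeated stride-many times.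

-- ===== PORT A =====
def list_benchmark (n : Int) : Int :=
  let arr := (PySem.List.pyRange 0 n 1).foldl (fun acc i => acc ++ [i]) []
  let total := arr.foldl (fun t x => t + x) 0
  let access_sum := (PySem.List.pyRange 0 n 1).foldl
      (fun s i => s + PySem.List.pyGetD arr (PySem.Int.mod (i * 7 + 13) n) 0) 0
  total + access_sum

-- ===== PORT B =====
def list_benchmark_alt (n : Int) : Int :=
  if n ≤ 0 then 0
  else
    let total := PySem.Int.floordiv (n * (n - 1)) 2
    let access :=
      if PySem.Int.mod n 7 = 0 then
        let m := PySem.Int.floordiv n 7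
        49 * PySem.Int.floordiv (m * (m - 1)) 2 + 42 * m
      else total
    total + access

-- ===== PRECONDITION & SPEC =====
def Spec_list_benchmark (n : Int) (out : Int) : Prop := out = list_benchmark_alt n
instance (n : Int) (out : Int) : Decidable (Spec_list_benchmark n out) := by unfold Spec_list_benchmark; infer_instance

-- ===== CLAIM (what is proved, stated in full; the proofs are below) =====
def Claim_equal_list_benchmark : Prop := ∀ (n : Int), Dom_list_benchmark n → Spec_list_benchmark n (list_benchmark n)

-- ===== LEMMAS AND PROOFS =====

theorem pvListSum (N : ℕ) (f : ℕ → ℤ) :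
    (List.map f (List.range N)).sum = ∑ k ∈ Finset.range N, f k := by
  simp [Finset.range, Multiset.range, Multiset.sum_coe, Multiset.map_coe]

-- the access indices (7k+13) % N, k < N, are a permutation of range N when gcd(7,N)=1
theorem pvSumMod_coprime (N : ℕ) (hN : 0 < N) (hdvd : ¬ (7 ∣ N)) :
    (∑ k ∈ Finset.range N, (7 * k + 13) % N) = ∑ k ∈ Finset.range N, k := by
  have h7 : Nat.Coprime 7 N := (Nat.Prime.coprime_iff_not_dvd (by norm_num)).mpr hdvd
  have hinj : Set.InjOn (fun k => (7 * k + 13) % N) (Finset.range N) := by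
    intro a ha b hb hab
    simp only [Finset.coe_range, Set.mem_Iio] at ha hb
    have hm : 7 * a ≡ 7 * b [MOD N] := Nat.ModEq.add_right_cancel' 13 hab
    have hm2 : a ≡ b [MOD N] := hm.cancel_left_of_coprime (Nat.coprime_comm.mp h7)
    exact hm2.eq_of_lt_of_lt ha hb
  have himg : (Finset.range N).image (fun k => (7 * k + 13) % N) = Finset.range N := by
    apply Finset.eq_of_subset_of_card_le
    · intro x hx
      simp only [Finset.mem_image] at hx
      obtain ⟨k, _, hk⟩ := hx
      simpa [← hk] using Nat.mod_lt _ hN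
    · rw [Finset.card_image_of_injOn hinj]
  have hsum : (∑ j ∈ (Finset.range N).image (fun k => (7 * k + 13) % N), j)
      = ∑ k ∈ Finset.range N, (7 * k + 13) % N :=
    Finset.sum_image (fun a ha b hb h => hinj ha hb h)
  rw [himg] at hsum
  exact hsum.symm

-- summing a function of k % m over c full periods
theorem pvSum_period (g : ℕ → ℕ) (m c : ℕ) :
    (∑ k ∈ Finset.range (c * m), g (k % m)) = c * ∑ r ∈ Finset.range m, g r := by
  induction c with
  | zero => simp
  | succ c ih =>
    rw [Nat.succ_mul, Finset.sum_range_add, ih]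
    have : ∀ j ∈ Finset.range m, g ((c * m + j) % m) = g j := by
      intro j hj
      rw [mul_comm, Nat.mul_add_mod, Nat.mod_eq_of_lt (Finset.mem_range.mp hj)]
    rw [Finset.sum_congr rfl this]
    ring

theorem pvSumMod_dvd (u : ℕ) :
    (∑ k ∈ Finset.range (7 * (u + 1)), (7 * k + 13) % (7 * (u + 1)))
      = 49 * (∑ r ∈ Finset.range u, r) + 91 * u + 42 := by
  have hper : ∀ k, (7 * k + 13) % (7 * (u + 1)) = (7 * (k % (u + 1)) + 13) % (7 * (u + 1)) := by
    intro k
    conv_lhs => rw [← Nat.div_add_mod k (u + 1)]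
    rw [show 7 * ((u + 1) * (k / (u + 1)) + k % (u + 1)) + 13
          = 7 * (k % (u + 1)) + 13 + (7 * (u + 1)) * (k / (u + 1)) from by ring,
        Nat.add_mul_mod_self_left]
  calc (∑ k ∈ Finset.range (7 * (u + 1)), (7 * k + 13) % (7 * (u + 1)))
      = ∑ k ∈ Finset.range (7 * (u + 1)), (7 * (k % (u + 1)) + 13) % (7 * (u + 1)) :=
        Finset.sum_congr rfl (fun k _ => hper k)
    _ = 7 * ∑ r ∈ Finset.range (u + 1), (7 * r + 13) % (7 * (u + 1)) :=
        pvSum_period (fun r => (7 * r + 13) % (7 * (u + 1))) (u + 1) 7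
    _ = 7 * ((∑ r ∈ Finset.range u, (7 * r + 13) % (7 * (u + 1))) + (7 * u + 13) % (7 * (u + 1))) := by
        rw [Finset.sum_range_succ]
    _ = 7 * ((∑ r ∈ Finset.range u, (7 * r + 13)) + 6) := by
        congr 2
        · exact Finset.sum_congr rfl (fun r hr => Nat.mod_eq_of_lt (by
            have := Finset.mem_range.mp hr; omega))
        · rw [show 7 * u + 13 = 6 + (7 * (u + 1)) * 1 from by ring,
            Nat.add_mul_mod_self_left, Nat.mod_eq_of_lt (by omega)]
    _ = 49 * (∑ r ∈ Finset.range u, r) + 91 * u + 42 := by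
        rw [Finset.sum_add_distrib, ← Finset.mul_sum]
        simp [Finset.sum_const, Finset.card_range]
        ring

-- A's value, as two Finset sums over ℕ
theorem pvA_eq_sums (N : ℕ) (hN : 0 < N) :
    list_benchmark (N : Int)
      = ((∑ k ∈ Finset.range N, k : ℕ) : Int)
        + ((∑ k ∈ Finset.range N, (7 * k + 13) % N : ℕ) : Int) := by
  unfold list_benchmark
  simp only [PySem.List.pyRange_zero_nat, PySem.List.foldl_append_singleton_eq_map,
    List.nil_append, List.map_id']
  rw [PySem.List.foldl_add _ (fun x : ℤ => x) 0, PySem.List.foldl_add, zero_add, zero_add,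
    List.map_id', List.map_map, pvListSum, pvListSum, Nat.cast_sum, Nat.cast_sum]
  refine congrArg₂ (· + ·) (Finset.sum_congr rfl fun k _ => rfl)
    (Finset.sum_congr rfl fun k hk => ?_)
  have hk' := Finset.mem_range.mp hk
  show PySem.List.pyGetD (List.map (fun k : ℕ => (k : Int)) (List.range N))
      (PySem.Int.mod ((k : Int) * 7 + 13) (N : Int)) 0 = (((7 * k + 13) % N : ℕ) : Int)
  rw [show ((k : Int) * 7 + 13) = ((k * 7 + 13 : ℕ) : Int) from by push_cast; ring,
    PySem.Int.mod_natCast, PySem.List.pyGetD_natCast,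
    PySem.List.getD_map_range _ _ _ _ (Nat.mod_lt _ hN)]
  norm_num [mul_comm]

-- ===== VERDICT (by name: the statement is the Claim_ definition above) =====
theorem list_benchmark_spec : Claim_equal_list_benchmark := by
  intro n _
  unfold Spec_list_benchmark
  by_cases hn : n ≤ 0
  · have h1 : PySem.List.pyRange 0 n 1 = [] := PySem.List.pyRange_one_eq_nil hn
    simp [list_benchmark, list_benchmark_alt, h1, hn]
  · rw [not_le] at hn
    obtain ⟨N, rfl⟩ : ∃ N : ℕ, n = (N : Int) := ⟨n.toNat, by omega⟩
    have hN : 0 < N := by exact_mod_cast hn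
    rw [pvA_eq_sums N hN]
    have hmod : PySem.Int.mod (N : Int) 7 = ((N % 7 : ℕ) : Int) := by
      exact_mod_cast PySem.Int.mod_natCast N 7
    have hdiv : PySem.Int.floordiv (N : Int) 7 = ((N / 7 : ℕ) : Int) := by
      exact_mod_cast PySem.Int.floordiv_natCast N 7
    have hT := Finset.sum_range_id_mul_two N
    have htotal : PySem.Int.floordiv ((N : Int) * ((N : Int) - 1)) 2
        = ((∑ k ∈ Finset.range N, k : ℕ) : Int) := by
      have h2 : ((N * (N - 1) : ℕ) : ℤ) = (N : ℤ) * ((N : ℤ) - 1) := by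
        push_cast [Nat.cast_sub (by omega : 1 ≤ N)]; ring
      have h1 : (N : ℤ) * ((N : ℤ) - 1) = ((∑ k ∈ Finset.range N, k : ℕ) : ℤ) * 2 := by
        rw [← h2]; exact_mod_cast hT.symm
      rw [h1, PySem.Int.floordiv_eq_ediv_of_pos (by norm_num)]
      omega
    simp only [list_benchmark_alt, if_neg (not_le.mpr hn), hmod, hdiv, htotal]
    by_cases h7 : 7 ∣ N
    · rw [if_pos (by exact_mod_cast (show N % 7 = 0 by omega))]
      obtain ⟨m, rfl⟩ := h7
      obtain ⟨u, rfl⟩ : ∃ u, m = u + 1 := ⟨m - 1, by omega⟩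
      rw [pvSumMod_dvd u]
      have hmdiv : (7 * (u + 1)) / 7 = u + 1 := by omega
      rw [hmdiv]
      set t := (∑ r ∈ Finset.range u, r) with ht
      have hs : (∑ r ∈ Finset.range (u + 1), r) = t + u := Finset.sum_range_succ (fun r => r) u
      have hg : (∑ r ∈ Finset.range (u + 1), r) * 2 = (u + 1) * u := by
        simpa using Finset.sum_range_id_mul_two (u + 1)
      have hnat : (u + 1) * u = (t + u) * 2 := by rw [← hg, hs]
      have hcast : ((u : ℤ) + 1) * ((u : ℤ)) = ((t : ℤ) + (u : ℤ)) * 2 := by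
        have := congrArg (Nat.cast : ℕ → ℤ) hnat
        push_cast at this
        exact this
      have haccess : PySem.Int.floordiv (((u + 1 : ℕ) : ℤ) * (((u + 1 : ℕ) : ℤ) - 1)) 2
          = (t : ℤ) + (u : ℤ) := by
        have h1 : (((u + 1 : ℕ) : ℤ) * (((u + 1 : ℕ) : ℤ) - 1)) = ((t : ℤ) + (u : ℤ)) * 2 := by
          push_cast
          rw [add_sub_cancel_right]
          exact_mod_cast hcast
        rw [h1, PySem.Int.floordiv_eq_ediv_of_pos (by norm_num)]
        omega
      rw [haccess]
      push_cast
      ring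
    · rw [if_neg (by
        have : N % 7 ≠ 0 := fun h => h7 (Nat.dvd_of_mod_eq_zero h)
        exact_mod_cast this), pvSumMod_coprime N hN h7]
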